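-- pv_equiv track=rewrite | github.com/tessyelots/BDD | BDD.py | uprav_vstup
-- ===== SOURCE A (Python) =====
-- def uprav_vstup(vstup, postup):
--     casti = vstup.split(" + ")
--     vstup = ""
--     casti1 = []
--     for i in range(len(casti)):
--         #uprava dvojitej negacie
--         if "!!" in casti[i]:
--             casti[i] = casti[i].replace("!!", "::")
--
--         pomoc = []
--         for j in range (len(casti[i])):
--             if casti[i][j] in postup:
--                 if casti[i][j - 1] == '!':
--                     pomoc.append(casti[i][j - 1] + casti[i][j])
--                 else:
--                     pomoc.append(casti[i][j])
--
--         #A . A = A alebo !A . !A = !A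
--         pomoc = list(dict.fromkeys(pomoc))
--
--         #usporiadanie podla postupu
--         pomoc1 = []
--         vyraz = ""
--         for j in range(len(postup)):
--             for k in range (len(pomoc)):
--                 if pomoc[k][0] == postup[j]:
--                     pomoc1.append(pomoc[k])
--                 elif len(pomoc[k]) == 2:
--                     if pomoc[k][1] == postup[j]:
--                         pomoc1.append(pomoc[k])
--
--         for j in range(len(pomoc1)):
--             vyraz += pomoc1[j]
--
--         casti1.append(vyraz)
--
--     # !A.A = 0 alebo A!A = 0
--     for k in range(len(postup)):
--         vymazat1 = '!' + postup[k] + postup[k]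
--         vymazat2 = postup[k] + '!' + postup[k]
--         remove = []
--         pomoc = 0
--         for j in range (len(casti1)):
--             if vymazat1 in casti1[j]:
--                 casti1[j] = ""
--             elif vymazat2 in casti1[j]:
--                 casti1[j] = ""
--
--     while "" in casti1:
--         casti1.remove("")
--
--     for i in range (len (casti1)):
--         vstup += casti1[i] + " + "
--     vstup = vstup.rstrip(" +")
--
--     return vstup
-- ===== SOURCE B (Python) =====
-- def _var_positions(pos, lit):
--     """All postup-positions this literal matches, via the index table."""
--     js = list(pos.get(lit[0], []))
--     if len(lit) == 2 and lit[1] != lit[0]: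
--         js += pos.get(lit[1], [])
--     return js
--
--
-- def uprav_vstup(vstup, postup):
--     # position table: variable char -> list of its indices in postup (built once)
--     pos = {}
--     for j, ch in enumerate(postup):
--         pos.setdefault(ch, []).append(j)
--
--     terms = []
--     for part in vstup.split(" + "):
--         part = part.replace("!!", "::")
--         # extract literals (a char of postup, with a preceding '!' kept; index -1 wraps)
--         pomoc = []
--         seen = set()
--         for j, ch in enumerate(part):
--             if ch in pos:
--                 lit = part[j - 1] + ch if part[j - 1] == '!' else ch
--                 if lit not in seen:
--                     seen.add(lit)
--                     pomoc.append(lit)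
--         # order literals by their variable's position(s) in postup: one lexicographic sort
--         matches = []
--         for k, lit in enumerate(pomoc):
--             matches += [(j, k) for j in _var_positions(pos, lit)]
--         matches.sort()
--         terms.append("".join(pomoc[k] for _, k in matches))
--
--     # drop contradictory (A.!A) and empty terms, then join
--     kept = [t for t in terms
--             if t and not any('!' + c + c in t or c + '!' + c in t for c in postup)]
--     return " + ".join(kept).rstrip(" +")
-- ===== Notes on version B (the rewrite author's own statement) =====
-- stated objective: alternative
-- what changed: The O(|postup|*|pomoc|) double-loop reordering of each term is replaced by a position table built once from postup plus one lexicographic sort of (position, literal-index) match pairs, and the blank-out/remove-empties conflict pass becomes a single filter over the joined terms.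
import Mathlib
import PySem

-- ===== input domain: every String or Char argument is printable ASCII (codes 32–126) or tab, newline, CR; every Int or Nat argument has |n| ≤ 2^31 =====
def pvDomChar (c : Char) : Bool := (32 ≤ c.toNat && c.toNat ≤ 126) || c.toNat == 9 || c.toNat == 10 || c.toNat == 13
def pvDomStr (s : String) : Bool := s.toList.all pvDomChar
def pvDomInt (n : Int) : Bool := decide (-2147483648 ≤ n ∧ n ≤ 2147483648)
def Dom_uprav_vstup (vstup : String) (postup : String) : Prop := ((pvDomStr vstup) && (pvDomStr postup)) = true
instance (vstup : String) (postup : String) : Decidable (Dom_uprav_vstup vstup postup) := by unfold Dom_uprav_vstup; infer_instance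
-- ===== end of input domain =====

-- B replaces A's O(|postup|·|pomoc|) double-loop reorder by a position table + one lexicographic
-- sort of the match pairs (objective: alternative decomposition; same observable return value).

-- s.rstrip(" + ") ported by hand (PySem has no right-only strip with a chars argument): exact —
-- drop from the right while the character is ' ' or '+'.  Used by both ports (same Python builtin).
def pvRstripPlus (cs : List Char) : List Char :=
  (cs.reverse.dropWhile (fun ch => ch = ' ' || ch = '+')).reverse

-- ===== PORT A =====
-- the literal-extraction loop 'for j in range(len(casti[i])): …' (j-1 = -1 wraps to the last char)
def pvA_extract (postup c : List Char) : List (List Char) :=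
  (PySem.List.pyRange 0 (PySem.List.len c) 1).foldl (fun acc j =>
    if PySem.Chars.isIn [PySem.List.pyGetD c j ' '] postup then
      if PySem.List.pyGetD c (j - 1) ' ' = '!' then
        acc ++ [[PySem.List.pyGetD c (j - 1) ' ', PySem.List.pyGetD c j ' ']]
      else
        acc ++ [[PySem.List.pyGetD c j ' ']]
    else acc) []

-- the double loop 'for j in range(len(postup)): for k in range(len(pomoc)): …'
def pvA_reorder (postup : List Char) (pomoc : List (List Char)) : List (List Char) :=
  (PySem.List.pyRange 0 (PySem.List.len postup) 1).foldl (fun acc j =>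
    (PySem.List.pyRange 0 (PySem.List.len pomoc) 1).foldl (fun acc k =>
      if PySem.List.pyGetD (PySem.List.pyGetD pomoc k []) 0 ' ' = PySem.List.pyGetD postup j ' ' then
        acc ++ [PySem.List.pyGetD pomoc k []]
      else if (PySem.List.pyGetD pomoc k []).length = 2 then
        if PySem.List.pyGetD (PySem.List.pyGetD pomoc k []) 1 ' ' = PySem.List.pyGetD postup j ' ' then
          acc ++ [PySem.List.pyGetD pomoc k []]
        else acc
      else acc) acc) []

-- one iteration of the outer 'for i in range(len(casti))' body (reads only casti[i])
def pvA_term (postup c0 : List Char) : List Char :=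
  let c := if PySem.Chars.isIn ['!', '!'] c0 then PySem.Chars.replace c0 ['!', '!'] [':', ':'] else c0
  let pomoc := PySem.List.dedup (pvA_extract postup c)     -- list(dict.fromkeys(pomoc))
  (pvA_reorder postup pomoc).foldl (fun vyraz x => vyraz ++ x) []

def uprav_vstup (vstup : String) (postup : String) : String :=
  let P := postup.toList
  let casti := PySem.Chars.splitOn vstup.toList [' ', '+', ' ']
  let casti1 := casti.foldl (fun acc part => acc ++ [pvA_term P part]) []
  -- 'for k in range(len(postup)): … for j in …: casti1[j] = ""' (index assignment = map)
  let casti2 := (PySem.List.pyRange 0 (PySem.List.len P) 1).foldl (fun lst k =>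
    lst.map (fun t =>
      if PySem.Chars.isIn ['!', PySem.List.pyGetD P k ' ', PySem.List.pyGetD P k ' '] t then []
      else if PySem.Chars.isIn [PySem.List.pyGetD P k ' ', '!', PySem.List.pyGetD P k ' '] t then []
      else t)) casti1
  -- 'while "" in casti1: casti1.remove("")' removes every empty string, order kept = filter
  let casti3 := casti2.filter (fun t => !t.isEmpty)
  let out := casti3.foldl (fun acc t => acc ++ t ++ [' ', '+', ' ']) []
  String.ofList (pvRstripPlus out)

-- ===== PORT B =====
-- pos = {}; for j, ch in enumerate(postup): pos.setdefault(ch, []).append(j)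
def pvB_pos (P : List Char) : PySem.Dict Char (List Int) :=
  (PySem.List.enumerate P 0).foldl (fun d p => d.modify p.2 [] (fun js => js ++ [p.1])) PySem.Dict.empty

-- _var_positions(pos, lit): all postup-positions this literal matches
def pvB_js (pos : PySem.Dict Char (List Int)) (lit : List Char) : List Int :=
  let js := pos.getD (PySem.List.pyGetD lit 0 ' ') []
  if lit.length = 2 && !(PySem.List.pyGetD lit 1 ' ' == PySem.List.pyGetD lit 0 ' ')
  then js ++ pos.getD (PySem.List.pyGetD lit 1 ' ') [] else js

def pvB_term (pos : PySem.Dict Char (List Int)) (part0 : List Char) : List Char :=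
  let part := PySem.Chars.replace part0 ['!', '!'] [':', ':']
  -- seen-set extraction loop (j - 1 = -1 wraps to the last char, as in Python)
  let st := (PySem.List.enumerate part 0).foldl
    (fun (st : List (List Char) × PySem.Set (List Char)) p =>
      if pos.contains p.2 then
        if st.2.contains (if PySem.List.pyGetD part (p.1 - 1) ' ' = '!'
                          then [PySem.List.pyGetD part (p.1 - 1) ' ', p.2] else [p.2]) then st
        else (st.1 ++ [if PySem.List.pyGetD part (p.1 - 1) ' ' = '!'
                       then [PySem.List.pyGetD part (p.1 - 1) ' ', p.2] else [p.2]],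
              st.2.add (if PySem.List.pyGetD part (p.1 - 1) ' ' = '!'
                        then [PySem.List.pyGetD part (p.1 - 1) ' ', p.2] else [p.2]))
      else st) ([], PySem.Set.empty)
  let pomoc := st.1
  -- match pairs (position in postup, index in pomoc) via the table, then one sort
  let mtchs := (PySem.List.enumerate pomoc 0).foldl (fun ms q =>
    ms ++ (pvB_js pos q.2).map (fun j => (j, q.1))) ([] : List (Int × Int))
  PySem.Chars.join [] ((PySem.List.sorted2 mtchs (·.1) (·.2)).map (fun m => PySem.List.pyGetD pomoc m.2 []))

def uprav_vstup_alt (vstup : String) (postup : String) : String :=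
  let P := postup.toList
  let pos := pvB_pos P
  let terms := (PySem.Chars.splitOn vstup.toList [' ', '+', ' ']).map (fun part => pvB_term pos part)
  let kept := terms.filter (fun t => !t.isEmpty &&
    !(P.any (fun ch => PySem.Chars.isIn ['!', ch, ch] t || PySem.Chars.isIn [ch, '!', ch] t)))
  String.ofList (pvRstripPlus (PySem.Chars.join [' ', '+', ' '] kept))

-- ===== PRECONDITION & SPEC =====
def Spec_uprav_vstup (vstup : String) (postup : String) (out : String) : Prop := out = uprav_vstup_alt vstup postup
instance (vstup : String) (postup : String) (out : String) : Decidable (Spec_uprav_vstup vstup postup out) := by unfold Spec_uprav_vstup; infer_instance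

-- ===== CLAIM (what is proved, stated in full; the proofs are below) =====
def Claim_equal_uprav_vstup : Prop := ∀ (vstup : String) (postup : String), Dom_uprav_vstup vstup postup → Spec_uprav_vstup vstup postup (uprav_vstup vstup postup)

-- ===== LEMMAS AND PROOFS =====

-- proof-side abbreviations
def pvLit (c : List Char) (j : Int) : List Char :=
  if PySem.List.pyGetD c (j - 1) ' ' = '!'
  then [PySem.List.pyGetD c (j - 1) ' ', PySem.List.pyGetD c j ' ']
  else [PySem.List.pyGetD c j ' ']

def pvMtch (e : List Char) (cj : Char) : Bool :=
  (e.getD 0 ' ' == cj) || (e.length == 2 && (e.getD 1 ' ' == cj))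

def pvBad (c : Char) (t : List Char) : Bool :=
  PySem.Chars.isIn ['!', c, c] t || PySem.Chars.isIn [c, '!', c] t

def pvPairs (P : List Char) (pomoc : List (List Char)) : List (Int × Int) :=
  (PySem.List.enumerate P 0).flatMap (fun pj =>
    ((PySem.List.enumerate pomoc 0).filter (fun q => pvMtch q.2 pj.2)).map (fun q => (pj.1, q.1)))

-- ---- replace with no occurrence is the identity ----
theorem pv_go_id (old new : List Char) :
    ∀ (fuel : Nat) (l acc : List Char), ¬ (old <:+: l) →
      PySem.Chars.replace.go old new fuel l acc = acc.reverse ++ l := by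
  intro fuel
  induction fuel with
  | zero => intro l acc _; simp [PySem.Chars.replace.go]
  | succ n ih =>
    intro l acc h
    cases l with
    | nil => simp [PySem.Chars.replace.go]
    | cons c t =>
      have hp : old.isPrefixOf (c :: t) = false := by
        by_contra hb
        have : old <+: (c :: t) := List.isPrefixOf_iff_prefix.mp (by simpa using hb)
        exact h this.isInfix
      have ht : ¬ (old <:+: t) := fun hi => h (List.infix_cons hi)
      simp [PySem.Chars.replace.go, hp, ih t (c :: acc) ht]

theorem pv_replace_id (s : List Char) (h : ¬ (['!','!'] <:+: s)) :
    PySem.Chars.replace s ['!','!'] [':',':'] = s := by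
  simpa using pv_go_id ['!','!'] [':',':'] s.length s [] h

theorem pv_normalize (c0 : List Char) :
    (if PySem.Chars.isIn ['!','!'] c0 then PySem.Chars.replace c0 ['!','!'] [':',':'] else c0)
      = PySem.Chars.replace c0 ['!','!'] [':',':'] := by
  by_cases h : PySem.Chars.isIn ['!','!'] c0
  · simp [h]
  · simp [h, pv_replace_id c0 ((PySem.Chars.isIn_eq_false_iff _ _).mp (by simpa using h))]

-- ---- the position table ----
theorem pv_pos_getD (P : List Char) (c : Char) :
    (pvB_pos P).getD c [] = ((PySem.List.enumerate P 0).filter (fun p => p.2 == c)).map (·.1) := by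
  unfold pvB_pos
  rw [show ((PySem.List.enumerate P 0).foldl (fun d p => d.modify p.2 [] (fun js => js ++ [p.1])) PySem.Dict.empty)
      = (((PySem.List.enumerate P 0).map (fun p => (p.2, p.1))).foldl (fun d q => d.modify q.1 [] (fun js => js ++ [q.2])) PySem.Dict.empty) from
    (List.foldl_map (f := fun p : Int × Char => (p.2, p.1))
      (g := fun (d : PySem.Dict Char (List Int)) (q : Char × Int) => d.modify q.1 [] (fun js => js ++ [q.2]))).symm]
  rw [PySem.Dict.getD_foldl_modify_append]
  simp [PySem.Dict.getD_empty, List.filter_map, List.map_map, Function.comp_def]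

theorem pv_mem_pos_getD (P : List Char) (c : Char) (j : Int) :
    j ∈ (pvB_pos P).getD c []
      ↔ ∃ (k : Nat) (_ : k < P.length), j = (k : Int) ∧ P[k] = c := by
  rw [pv_pos_getD]
  simp only [List.mem_map, List.mem_filter, PySem.List.mem_enumerate_iff]
  constructor
  · rintro ⟨p, ⟨⟨k, hk, rfl⟩, hc⟩, rfl⟩
    exact ⟨k, hk, by simp, by simpa using hc⟩
  · rintro ⟨k, hk, rfl, hc⟩
    exact ⟨((k : Int), P[k]), ⟨⟨k, hk, by simp⟩, by simpa using hc⟩, rfl⟩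

theorem pv_pairwise_pos_getD (P : List Char) (c : Char) :
    ((pvB_pos P).getD c []).Pairwise (· < ·) := by
  rw [pv_pos_getD]
  rw [List.pairwise_map]
  exact (PySem.List.pairwise_lt_enumerate P 0).filter _

theorem pv_pos_contains (P : List Char) (ch : Char) :
    (pvB_pos P).contains ch = PySem.Chars.isIn [ch] P := by
  have hk : (pvB_pos P).keys = PySem.Set.ofList P := by
    unfold pvB_pos
    rw [PySem.Dict.keys_foldl_modify_key (PySem.List.enumerate P 0) (fun p => p.2) [] (fun _ p js => js ++ [p.1]) PySem.Dict.empty]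
    simp [PySem.Dict.keys_empty, PySem.Set.update_nil_left, PySem.List.map_snd_enumerate]
  rw [Bool.eq_iff_iff]
  rw [PySem.Dict.contains_iff_mem_keys, hk, PySem.Set.mem_ofList, PySem.Chars.isIn_iff_infix]
  exact (List.singleton_infix_iff ch P).symm

-- ---- extraction ----
theorem pv_extractA_eq (P c : List Char) :
    pvA_extract P c
      = ((PySem.List.pyRange 0 (PySem.List.len c) 1).filter
          (fun j => PySem.Chars.isIn [PySem.List.pyGetD c j ' '] P)).map (pvLit c) := by
  unfold pvA_extract
  rw [show (fun (acc : List (List Char)) (j : Int) =>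
        if PySem.Chars.isIn [PySem.List.pyGetD c j ' '] P then
          if PySem.List.pyGetD c (j - 1) ' ' = '!' then
            acc ++ [[PySem.List.pyGetD c (j - 1) ' ', PySem.List.pyGetD c j ' ']]
          else acc ++ [[PySem.List.pyGetD c j ' ']]
        else acc)
      = fun acc j => if PySem.Chars.isIn [PySem.List.pyGetD c j ' '] P then acc ++ [pvLit c j] else acc from by
    funext acc j
    by_cases h : PySem.Chars.isIn [PySem.List.pyGetD c j ' '] P
    · by_cases h2 : PySem.List.pyGetD c (j - 1) ' ' = '!' <;> simp [h, h2, pvLit]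
    · simp [h]]
  rw [PySem.List.foldl_append_if]
  simp

theorem pv_pairfold {α β : Type} [BEq β] (l : List α) (cond : α → Bool) (f : α → β) (s : List β) :
    (l.foldl (fun st x =>
        if cond x then
          if PySem.Set.contains st.2 (f x) then st
          else (st.1 ++ [f x], PySem.Set.add st.2 (f x))
        else st) ((s, s) : List β × PySem.Set β)).1
      = PySem.Set.update s ((l.filter cond).map f) := by
  have hupd : ∀ (s xs : List β), PySem.Set.update s xs = xs.foldl PySem.Set.add s := by
    intro s xs
    simpa using (PySem.Set.update_map_eq_foldl_add xs id s)
  induction l generalizing s with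
  | nil => simp [hupd]
  | cons a t ih =>
    simp only [List.foldl_cons, List.filter_cons]
    by_cases h : cond a
    · simp only [h, if_true, List.map_cons]
      by_cases hc : List.contains s (f a)
      · have ha : PySem.Set.add s (f a) = s := by simp [PySem.Set.add, PySem.Set.contains, hc]
        rw [if_pos (show PySem.Set.contains s (f a) = true from hc)]
        rw [ih s, hupd, hupd, List.foldl_cons, show PySem.Set.add s (f a) = s from ha]
      · have ha : PySem.Set.add s (f a) = s ++ [f a] := by simp [PySem.Set.add, PySem.Set.contains, hc]
        rw [if_neg (show ¬ PySem.Set.contains s (f a) = true from by simpa [PySem.Set.contains] using hc)]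
        rw [ha, ih (s ++ [f a]), hupd, hupd, List.foldl_cons, show PySem.Set.add s (f a) = s ++ [f a] from ha]
    · simp only [if_neg h]
      exact ih s

theorem pv_extract_eq (P c : List Char) :
    ((PySem.List.enumerate c 0).foldl
      (fun (st : List (List Char) × PySem.Set (List Char)) p =>
        if (pvB_pos P).contains p.2 then
          if st.2.contains (if PySem.List.pyGetD c (p.1 - 1) ' ' = '!'
                            then [PySem.List.pyGetD c (p.1 - 1) ' ', p.2] else [p.2]) then st
          else (st.1 ++ [if PySem.List.pyGetD c (p.1 - 1) ' ' = '!'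
                         then [PySem.List.pyGetD c (p.1 - 1) ' ', p.2] else [p.2]],
                st.2.add (if PySem.List.pyGetD c (p.1 - 1) ' ' = '!'
                          then [PySem.List.pyGetD c (p.1 - 1) ' ', p.2] else [p.2]))
        else st) ([], PySem.Set.empty)).1
      = PySem.List.dedup (pvA_extract P c) := by
  rw [PySem.List.enumerate_eq_map_pyRange c ' ', List.foldl_map]
  refine (pv_pairfold (PySem.List.pyRange 0 (PySem.List.len c) 1)
    (fun j => (pvB_pos P).contains (PySem.List.pyGetD c j ' '))
    (fun j => if PySem.List.pyGetD c (j - 1) ' ' = '!'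
              then [PySem.List.pyGetD c (j - 1) ' ', PySem.List.pyGetD c j ' ']
              else [PySem.List.pyGetD c j ' ']) []).trans ?_
  rw [PySem.Set.update_nil_left, ← PySem.List.dedup_eq_ofList, pv_extractA_eq]
  simp only [pv_pos_contains]
  rfl

-- ---- reorder ----
theorem pv_reorderA_eq (P : List Char) (pomoc : List (List Char)) :
    pvA_reorder P pomoc = P.flatMap (fun cj => pomoc.filter (fun e => pvMtch e cj)) := by
  unfold pvA_reorder
  simp only [PySem.List.pyGetD_ofNat']
  rw [PySem.List.foldl_pyRange_zero_pyGetD P ' '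
    (fun acc cj => (PySem.List.pyRange 0 (PySem.List.len pomoc) 1).foldl (fun acc k =>
      if (PySem.List.pyGetD pomoc k []).getD 0 ' ' = cj then acc ++ [PySem.List.pyGetD pomoc k []]
      else if (PySem.List.pyGetD pomoc k []).length = 2 then
        if (PySem.List.pyGetD pomoc k []).getD 1 ' ' = cj then acc ++ [PySem.List.pyGetD pomoc k []]
        else acc
      else acc) acc) []]
  rw [show (fun (acc : List (List Char)) (cj : Char) => (PySem.List.pyRange 0 (PySem.List.len pomoc) 1).foldl (fun acc k =>
      if (PySem.List.pyGetD pomoc k []).getD 0 ' ' = cj then acc ++ [PySem.List.pyGetD pomoc k []]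
      else if (PySem.List.pyGetD pomoc k []).length = 2 then
        if (PySem.List.pyGetD pomoc k []).getD 1 ' ' = cj then acc ++ [PySem.List.pyGetD pomoc k []]
        else acc
      else acc) acc)
    = fun acc cj => acc ++ pomoc.filter (fun e => pvMtch e cj) from by
    funext acc cj
    rw [PySem.List.foldl_pyRange_zero_pyGetD pomoc []
      (fun acc e => if e.getD 0 ' ' = cj then acc ++ [e]
        else if e.length = 2 then (if e.getD 1 ' ' = cj then acc ++ [e] else acc) else acc) acc]
    rw [show (fun (acc : List (List Char)) (e : List Char) => if e.getD 0 ' ' = cj then acc ++ [e]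
        else if e.length = 2 then (if e.getD 1 ' ' = cj then acc ++ [e] else acc) else acc)
      = fun acc e => if pvMtch e cj then acc ++ [e] else acc from by
      funext acc e
      by_cases h0 : e.getD 0 ' ' = cj <;> by_cases h2 : e.length = 2 <;>
        by_cases h1 : e.getD 1 ' ' = cj <;>
        (try simp [pvMtch, h0, h2, h1]) <;> split_ifs <;> simp_all]
    rw [PySem.List.foldl_append_if (fun e => pvMtch e cj) (fun e => e) pomoc acc]
    simp]
  rw [PySem.List.foldl_append_eq_flatMap (fun cj => pomoc.filter (fun e => pvMtch e cj)) P []]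
  simp

theorem pv_sorted2_eq_sorted_lex {α : Type} (xs : List α) (k1 k2 : α → Int) :
    PySem.List.sorted2 xs k1 k2 = PySem.List.sorted xs (fun a => toLex (k1 a, k2 a)) := by
  unfold PySem.List.sorted2 PySem.List.sorted
  simp only [Bool.false_eq_true, if_false]
  congr 1
  funext acc x
  congr 1
  funext a b
  rcases lt_trichotomy (k1 a) (k1 b) with h | h | h
  · simp [Prod.Lex.lt_iff, h, lt_asymm h]
  · by_cases h2 : k2 a < k2 b <;> simp [Prod.Lex.lt_iff, h, h2]
  · simp [Prod.Lex.lt_iff, lt_asymm h, h, h.ne']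

theorem pv_mem_js (P : List Char) (e : List Char) (j : Int) :
    j ∈ pvB_js (pvB_pos P) e
      ↔ ∃ (k : Nat) (_ : k < P.length), j = (k : Int) ∧ pvMtch e P[k] = true := by
  unfold pvB_js
  dsimp only
  split
  case isTrue hg =>
    rw [Bool.and_eq_true] at hg
    have hlen : e.length = 2 := by simpa using hg.1
    have hne : ¬ (PySem.List.pyGetD e 1 ' ' = PySem.List.pyGetD e 0 ' ') := by simpa using hg.2
    simp only [List.mem_append, pv_mem_pos_getD]
    constructor
    · rintro (⟨k, hk, rfl, hc⟩ | ⟨k, hk, rfl, hc⟩) <;>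
        refine ⟨k, hk, rfl, ?_⟩ <;>
        simp [pvMtch, PySem.List.pyGetD_ofNat', List.getD] at hc ⊢ <;>
        simp [hc, hlen]
    · rintro ⟨k, hk, rfl, hc⟩
      simp only [pvMtch, Bool.or_eq_true, Bool.and_eq_true, beq_iff_eq] at hc
      rcases hc with hc | ⟨_, hc⟩
      · exact Or.inl ⟨k, hk, rfl, by simpa [PySem.List.pyGetD_ofNat', List.getD] using hc.symm⟩
      · exact Or.inr ⟨k, hk, rfl, by simpa [PySem.List.pyGetD_ofNat', List.getD] using hc.symm⟩
  case isFalse hg =>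
    simp only [pv_mem_pos_getD]
    constructor
    · rintro ⟨k, hk, rfl, hc⟩
      refine ⟨k, hk, rfl, ?_⟩
      simp [pvMtch, PySem.List.pyGetD_ofNat', List.getD] at hc ⊢
      simp [hc]
    · rintro ⟨k, hk, rfl, hc⟩
      simp only [pvMtch, Bool.or_eq_true, Bool.and_eq_true, beq_iff_eq] at hc
      rcases hc with hc | ⟨hlen, hc⟩
      · exact ⟨k, hk, rfl, by simpa [PySem.List.pyGetD_ofNat', List.getD] using hc.symm⟩
      · have he : PySem.List.pyGetD e 1 ' ' = PySem.List.pyGetD e 0 ' ' := by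
          by_contra hne
          refine hg ?_
          rw [Bool.and_eq_true]
          exact ⟨by simpa using hlen, by simpa using hne⟩
        refine ⟨k, hk, rfl, ?_⟩
        rw [← he]
        simpa [PySem.List.pyGetD_ofNat', List.getD] using hc.symm

theorem pv_nodup_js (P : List Char) (e : List Char) : (pvB_js (pvB_pos P) e).Nodup := by
  unfold pvB_js
  dsimp only
  have hnd : ∀ c, ((pvB_pos P).getD c []).Nodup := fun c => (pv_pairwise_pos_getD P c).nodup
  split
  case isTrue hg =>
    rw [Bool.and_eq_true] at hg
    have hne : ¬ (PySem.List.pyGetD e 1 ' ' = PySem.List.pyGetD e 0 ' ') := by simpa using hg.2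
    refine List.Nodup.append (hnd _) (hnd _) ?_
    intro j hj1 hj2
    rcases (pv_mem_pos_getD P _ j).mp hj1 with ⟨k1, hk1, rfl, hc1⟩
    rcases (pv_mem_pos_getD P _ _).mp hj2 with ⟨k2, hk2, hkk, hc2⟩
    have hkeq : k1 = k2 := by exact_mod_cast hkk
    subst hkeq
    exact hne (hc2 ▸ hc1 ▸ rfl)
  case isFalse hg => exact hnd _

theorem pv_matches_eq (P : List Char) (pomoc : List (List Char)) :
    (PySem.List.enumerate pomoc 0).foldl (fun ms q =>
        ms ++ (pvB_js (pvB_pos P) q.2).map (fun j => (j, q.1))) ([] : List (Int × Int))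
      = (PySem.List.enumerate pomoc 0).flatMap (fun q => (pvB_js (pvB_pos P) q.2).map (fun j => (j, q.1))) := by
  simpa using PySem.List.foldl_append_eq_flatMap
    (fun q => (pvB_js (pvB_pos P) q.2).map (fun j => (j, q.1))) (PySem.List.enumerate pomoc 0) []

theorem pv_mem_matches (P : List Char) (pomoc : List (List Char)) (m : Int × Int) :
    m ∈ (PySem.List.enumerate pomoc 0).flatMap (fun q => (pvB_js (pvB_pos P) q.2).map (fun j => (j, q.1)))
      ↔ ∃ (jn : Nat) (_ : jn < P.length) (k : Nat) (_ : k < pomoc.length),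
          m = ((jn : Int), (k : Int)) ∧ pvMtch pomoc[k] P[jn] = true := by
  simp only [List.mem_flatMap, List.mem_map, PySem.List.mem_enumerate_iff]
  constructor
  · rintro ⟨q, ⟨k, hk, rfl⟩, j, hj, rfl⟩
    rcases (pv_mem_js P _ j).mp hj with ⟨jn, hjn, rfl, hc⟩
    exact ⟨jn, hjn, k, hk, by simp, hc⟩
  · rintro ⟨jn, hjn, k, hk, rfl, hc⟩
    exact ⟨((k : Int), pomoc[k]), ⟨k, hk, by simp⟩, (jn : Int),
      (pv_mem_js P _ _).mpr ⟨jn, hjn, rfl, hc⟩, by simp⟩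

theorem pv_nodup_matches (P : List Char) (pomoc : List (List Char)) :
    ((PySem.List.enumerate pomoc 0).flatMap (fun q => (pvB_js (pvB_pos P) q.2).map (fun j => (j, q.1)))).Nodup := by
  rw [List.nodup_flatMap]
  constructor
  · intro q _
    exact (pv_nodup_js P q.2).map (fun j j' h => by simpa using congrArg Prod.fst h)
  · refine (PySem.List.pairwise_lt_enumerate pomoc 0).imp ?_
    intro q q' hlt m hm hm'
    simp only [List.mem_map] at hm hm'
    rcases hm with ⟨j, _, rfl⟩
    rcases hm' with ⟨j', _, hj'⟩
    have : q.1 = q'.1 := by simpa using (congrArg Prod.snd hj').symm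
    rw [this] at hlt
    exact lt_irrefl _ hlt

theorem pv_mem_pairs (P : List Char) (pomoc : List (List Char)) (m : Int × Int) :
    m ∈ pvPairs P pomoc
      ↔ ∃ (jn : Nat) (_ : jn < P.length) (k : Nat) (_ : k < pomoc.length),
          m = ((jn : Int), (k : Int)) ∧ pvMtch pomoc[k] P[jn] = true := by
  unfold pvPairs
  simp only [List.mem_flatMap, List.mem_map, List.mem_filter, PySem.List.mem_enumerate_iff]
  constructor
  · rintro ⟨pj, ⟨jn, hjn, rfl⟩, q, ⟨⟨k, hk, rfl⟩, hc⟩, rfl⟩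
    exact ⟨jn, hjn, k, hk, by simp, by simpa using hc⟩
  · rintro ⟨jn, hjn, k, hk, rfl, hc⟩
    exact ⟨((jn : Int), P[jn]), ⟨jn, hjn, by simp⟩,
      ⟨((k : Int), pomoc[k]), ⟨⟨k, hk, by simp⟩, by simpa using hc⟩, by simp⟩⟩

theorem pv_pairs_pairwise (P : List Char) (pomoc : List (List Char)) :
    (pvPairs P pomoc).Pairwise (fun a b => toLex a < toLex b) := by
  unfold pvPairs
  rw [List.pairwise_flatMap]
  constructor
  · intro pj _
    rw [List.pairwise_map]
    refine ((PySem.List.pairwise_lt_enumerate pomoc 0).filter _).imp ?_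
    intro q q' h
    rw [Prod.Lex.lt_iff]
    exact Or.inr ⟨rfl, h⟩
  · refine (PySem.List.pairwise_lt_enumerate P 0).imp ?_
    intro pj pj' hlt m hm m' hm'
    simp only [List.mem_map] at hm hm'
    rcases hm with ⟨q, _, rfl⟩
    rcases hm' with ⟨q', _, rfl⟩
    rw [Prod.Lex.lt_iff]
    exact Or.inl hlt

theorem pv_pairs_nodup (P : List Char) (pomoc : List (List Char)) : (pvPairs P pomoc).Nodup := by
  have h := pv_pairs_pairwise P pomoc
  rw [List.Nodup]
  refine List.Pairwise.imp ?_ h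
  intro a b hl he
  subst he
  exact (lt_self_iff_false _).mp hl

theorem pv_sorted_matches (P : List Char) (pomoc : List (List Char)) :
    PySem.List.sorted2 ((PySem.List.enumerate pomoc 0).foldl (fun ms q =>
        ms ++ (pvB_js (pvB_pos P) q.2).map (fun j => (j, q.1))) ([] : List (Int × Int))) (·.1) (·.2)
      = pvPairs P pomoc := by
  rw [pv_matches_eq, pv_sorted2_eq_sorted_lex]
  refine PySem.List.sorted_eq_of_perm_of_pairwise_lt _ _ _ ?_ ?_
  · refine (List.perm_ext_iff_of_nodup (pv_pairs_nodup P pomoc) (pv_nodup_matches P pomoc)).mpr ?_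
    intro m
    rw [pv_mem_pairs, pv_mem_matches]
  · exact pv_pairs_pairwise P pomoc

theorem pv_join_nil (l : List (List Char)) : PySem.Chars.join [] l = l.flatten := by
  induction l with
  | nil => rfl
  | cons a t ih =>
    cases t with
    | nil => simp [PySem.Chars.join, List.intercalate]
    | cons b r =>
      simp only [PySem.Chars.join, List.intercalate] at ih ⊢
      simp [List.intersperse_cons₂, ih, List.flatten]

theorem pv_filter_enum_snd {α : Type} (l : List α) (p : α → Bool) :
    ((PySem.List.enumerate l 0).filter (fun q => p q.2)).map (fun q => q.2) = l.filter p := by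
  calc ((PySem.List.enumerate l 0).filter (fun q => p q.2)).map (fun q => (q.2 : α))
      = (((PySem.List.enumerate l 0).map (fun q => q.2)).filter p) := (List.filter_map).symm
    _ = l.filter p := by rw [PySem.List.map_snd_enumerate]

theorem pv_map_pairs (P : List Char) (pomoc : List (List Char)) :
    (pvPairs P pomoc).map (fun m => PySem.List.pyGetD pomoc m.2 [])
      = P.flatMap (fun cj => pomoc.filter (fun e => pvMtch e cj)) := by
  unfold pvPairs
  rw [List.map_flatMap]
  rw [show (fun pj : Int × Char =>
      (((PySem.List.enumerate pomoc 0).filter (fun q => pvMtch q.2 pj.2)).map (fun q => (pj.1, q.1))).map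
        (fun m => PySem.List.pyGetD pomoc m.2 []))
    = (fun pj : Int × Char => pomoc.filter (fun e => pvMtch e pj.2)) from by
    funext pj
    rw [List.map_map]
    have h1 : (((PySem.List.enumerate pomoc 0).filter (fun q => pvMtch q.2 pj.2)).map
        ((fun m : Int × Int => PySem.List.pyGetD pomoc m.2 []) ∘ (fun q : Int × (List Char) => (pj.1, q.1))))
      = ((PySem.List.enumerate pomoc 0).filter (fun q => pvMtch q.2 pj.2)).map (fun q => q.2) := by
      refine List.map_congr_left ?_
      intro q hq
      rcases (PySem.List.mem_enumerate_iff pomoc 0 q).mp (List.mem_filter.mp hq).1 with ⟨k, hk, rfl⟩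
      simp [Function.comp_def, PySem.List.pyGetD_natCast, List.getD_eq_getElem, hk]
    rw [h1, pv_filter_enum_snd pomoc (fun e => pvMtch e pj.2)]]
  rw [← List.flatMap_map (fun p : Int × Char => p.2) (fun cj => pomoc.filter (fun e => pvMtch e cj)), PySem.List.map_snd_enumerate]

-- ---- per-term equality ----
theorem pv_term_eq (P part : List Char) : pvA_term P part = pvB_term (pvB_pos P) part := by
  simp only [pvA_term, pvB_term, pv_normalize]
  rw [pv_extract_eq P (PySem.Chars.replace part ['!','!'] [':',':'])]
  rw [PySem.List.foldl_append_eq_flatMap (fun x : List Char => x) _ []]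
  rw [pv_sorted_matches P _, pv_join_nil, pv_map_pairs, pv_reorderA_eq]
  simp [List.flatMap_id']

-- ---- the conflict pass, filtering and joining ----
theorem pv_conflict_fold_list (Q : List Char) (L : List (List Char)) :
    Q.foldl (fun lst c => lst.map (fun t =>
      if PySem.Chars.isIn ['!', c, c] t then []
      else if PySem.Chars.isIn [c, '!', c] t then [] else t)) L
    = L.map (fun t => if Q.any (fun c => pvBad c t) then [] else t) := by
  induction Q generalizing L with
  | nil => simp
  | cons c0 cs ih =>
    simp only [List.foldl_cons, List.any_cons]
    rw [ih, List.map_map]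
    refine List.map_congr_left ?_
    intro t _
    by_cases hb : pvBad c0 t = true
    · have hb' := hb
      simp only [pvBad, Bool.or_eq_true] at hb'
      have hz : (if PySem.Chars.isIn ['!', c0, c0] t then ([] : List Char)
          else if PySem.Chars.isIn [c0, '!', c0] t then [] else t) = ([] : List Char) := by
        rcases hb' with h | h <;> simp [h]
      simp only [Function.comp_apply, hz, hb, Bool.true_or, ite_self, if_true]
    · have hb' := hb
      simp only [pvBad, Bool.or_eq_true, not_or, Bool.not_eq_true] at hb'
      have hg : (if PySem.Chars.isIn ['!', c0, c0] t then ([] : List Char)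
          else if PySem.Chars.isIn [c0, '!', c0] t then [] else t) = t := by
        simp [hb'.1, hb'.2]
      have hbf : pvBad c0 t = false := by simpa using hb
      simp only [Function.comp_apply, hg, hbf, Bool.false_or]

theorem pv_conflict_fold (P : List Char) (L : List (List Char)) :
    (PySem.List.pyRange 0 (PySem.List.len P) 1).foldl (fun lst k =>
      lst.map (fun t =>
        if PySem.Chars.isIn ['!', PySem.List.pyGetD P k ' ', PySem.List.pyGetD P k ' '] t then []
        else if PySem.Chars.isIn [PySem.List.pyGetD P k ' ', '!', PySem.List.pyGetD P k ' '] t then []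
        else t)) L
      = L.map (fun t => if P.any (fun c => pvBad c t) then [] else t) := by
  rw [PySem.List.foldl_pyRange_zero_pyGetD P ' '
    (fun lst c => lst.map (fun t =>
      if PySem.Chars.isIn ['!', c, c] t then []
      else if PySem.Chars.isIn [c, '!', c] t then [] else t)) L]
  exact pv_conflict_fold_list P L

theorem pv_filter_conflict (P : List Char) (L : List (List Char)) :
    (L.map (fun t => if P.any (fun c => pvBad c t) then [] else t)).filter (fun t => !t.isEmpty)
      = L.filter (fun t => !t.isEmpty && !(P.any (fun c => pvBad c t))) := by
  rw [List.filter_map]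
  have hpred : ((fun t : List Char => !t.isEmpty) ∘
      (fun t => if P.any (fun c => pvBad c t) then [] else t))
      = fun t => !t.isEmpty && !(P.any (fun c => pvBad c t)) := by
    funext t
    by_cases ha : (P.any fun c => pvBad c t) = true
    · simp only [Function.comp_apply, ha, if_true, List.isEmpty_nil, Bool.not_true, Bool.and_false]
    · have ha' : (P.any fun c => pvBad c t) = false := by simpa using ha
      simp only [Function.comp_apply, ha', Bool.false_eq_true, if_false, Bool.not_false, Bool.and_true]
  rw [hpred]
  have hmap : ∀ t ∈ L.filter (fun t => !t.isEmpty && !(P.any (fun c => pvBad c t))),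
      (if P.any (fun c => pvBad c t) then [] else t) = t := by
    intro t ht
    have h2 := (List.mem_filter.mp ht).2
    simp only [Bool.and_eq_true, Bool.not_eq_true'] at h2
    simp [h2.2]
  rw [List.map_congr_left hmap]
  simp

theorem pv_rstrip_congr (x y1 y2 : List Char) (h : pvRstripPlus y1 = pvRstripPlus y2) :
    pvRstripPlus (x ++ y1) = pvRstripPlus (x ++ y2) := by
  have h' : y1.reverse.dropWhile (fun ch => ch = ' ' || ch = '+')
      = y2.reverse.dropWhile (fun ch => ch = ' ' || ch = '+') := by
    simpa [pvRstripPlus] using congrArg List.reverse h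
  simp [pvRstripPlus, List.reverse_append, List.dropWhile_append, h']

theorem pv_rstrip_sep (x : List Char) : pvRstripPlus (x ++ [' ', '+', ' ']) = pvRstripPlus x := by
  have h := pv_rstrip_congr x [' ', '+', ' '] [] (by decide)
  simpa using h

theorem pv_out_join (l : List (List Char)) :
    pvRstripPlus (l.foldl (fun acc t => acc ++ t ++ [' ', '+', ' ']) [])
      = pvRstripPlus (PySem.Chars.join [' ', '+', ' '] l) := by
  rw [show (fun (acc t : List Char) => acc ++ t ++ [' ', '+', ' '])
      = fun acc t => acc ++ (t ++ [' ', '+', ' ']) from by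
    funext a t; rw [List.append_assoc]]
  rw [PySem.List.foldl_append_eq_flatMap (fun t => t ++ [' ', '+', ' ']) l []]
  simp only [List.nil_append]
  induction l with
  | nil => rfl
  | cons a t ih =>
    cases t with
    | nil => simpa [PySem.Chars.join, List.intercalate] using pv_rstrip_sep a
    | cons b r =>
      rw [List.flatMap_cons]
      rw [pv_rstrip_congr (a ++ [' ', '+', ' ']) _ _ ih]
      rw [PySem.Chars.join_cons_cons]

theorem pv_main : ∀ (vstup : String) (postup : String), uprav_vstup vstup postup = uprav_vstup_alt vstup postup := by
  intro vstup postup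
  simp only [uprav_vstup, uprav_vstup_alt]
  rw [PySem.List.foldl_append_singleton_eq_map (pvA_term postup.toList) _ []]
  simp only [List.nil_append]
  rw [show pvA_term postup.toList = pvB_term (pvB_pos postup.toList) from funext (pv_term_eq postup.toList)]
  rw [pv_conflict_fold, pv_filter_conflict, pv_out_join]
  rfl

-- ===== VERDICT (by name: the statement is the Claim_ definition above) =====
theorem uprav_vstup_spec : Claim_equal_uprav_vstup := by
  intro vstup postup _
  unfold Spec_uprav_vstup
  exact pv_main vstup postup
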